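-- pv_equiv track=rewrite | github.com/DrArtemi/ocr-cezam | utils/process_table.py | store_boxes_to_tables
-- ===== SOURCE A (Python) =====
-- def store_boxes_to_tables(tables, boxes):
--     """This function store every box in it's table.
--
--     Args:
--         tables (list): List of detected tables.
--         boxes (list): List of detected boxes.
--
--     Returns:
--         list: List of boxes, arranged by table.
--     """
--     table_boxes = []
--     for table in tables:
--         tx, ty, tw, th = table
--         table_boxes.append([])
--         for b in boxes:
--             x, y, w, h = b
--             # If the box coords are IN the table coords,
--             # assign box to table
--             if tx < x < tx + tw and tx < x + w < tx + tw and\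
--                 ty < y < ty + th and ty < y + h < ty + th:
--                 table_boxes[-1].append(b)
--         table_boxes[-1].sort(key = lambda x: x[1])
--     return table_boxes
-- ===== SOURCE B (Python) =====
-- def store_boxes_to_tables(tables, boxes):
--     """Sort boxes by y once, then one containment filter per table
--     (the filtered sublists are already y-sorted; no per-table sort)."""
--     boxes_by_y = sorted(boxes, key=lambda b: b[1])
--     result = []
--     for tx, ty, tw, th in tables:
--         result.append([b for b in boxes_by_y
--                        if tx < b[0] < tx + tw and tx < b[0] + b[2] < tx + tw
--                        and ty < b[1] < ty + th and ty < b[1] + b[3] < ty + th])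
--     return result
-- ===== Notes on version B (the rewrite author's own statement) =====
-- stated objective: alternative
-- what changed: B sorts the boxes by y once globally and then runs a single containment filter per table (the filtered lists are already y-sorted), instead of A's per-table collect-then-sort with list sort; equal on all inputs by stability of the sort.
import Mathlib
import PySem

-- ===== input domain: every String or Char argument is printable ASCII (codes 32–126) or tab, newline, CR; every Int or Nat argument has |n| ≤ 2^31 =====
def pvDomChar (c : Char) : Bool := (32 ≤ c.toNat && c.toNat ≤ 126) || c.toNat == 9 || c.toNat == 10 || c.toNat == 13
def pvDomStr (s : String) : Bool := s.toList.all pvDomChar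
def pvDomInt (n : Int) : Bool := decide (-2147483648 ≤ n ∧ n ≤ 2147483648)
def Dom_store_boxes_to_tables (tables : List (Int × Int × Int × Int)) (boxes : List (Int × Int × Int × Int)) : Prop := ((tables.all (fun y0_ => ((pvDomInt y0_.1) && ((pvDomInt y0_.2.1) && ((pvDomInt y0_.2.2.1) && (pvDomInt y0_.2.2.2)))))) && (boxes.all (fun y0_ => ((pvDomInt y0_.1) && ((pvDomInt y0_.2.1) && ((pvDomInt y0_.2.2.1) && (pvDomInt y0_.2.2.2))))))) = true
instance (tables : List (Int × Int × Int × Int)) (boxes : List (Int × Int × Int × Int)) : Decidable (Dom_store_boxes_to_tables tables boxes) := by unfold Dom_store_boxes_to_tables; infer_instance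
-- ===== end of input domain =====

-- B sorts the boxes by y once up front and filters per table (filtered lists are already y-sorted), instead of A's per-table collect-then-sort; objective: alternative decomposition.

-- Containment predicate shared by both Pythons character-for-character.
def pvInTable (t : Int × Int × Int × Int) (b : Int × Int × Int × Int) : Bool :=
  match t, b with
  | (tx, ty, tw, th), (x, y, w, h) =>
    (decide (tx < x) && decide (x < tx + tw)) && (decide (tx < x + w) && decide (x + w < tx + tw)) &&
    (decide (ty < y) && decide (y < ty + th)) && (decide (ty < y + h) && decide (y + h < ty + th))

-- ===== PORT A =====
-- outer loop appends a fresh list per table; inner loop appends matching boxes; then sorts it by b[1]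
def store_boxes_to_tables (tables : List (Int × Int × Int × Int)) (boxes : List (Int × Int × Int × Int)) : List (List (Int × Int × Int × Int)) :=
  tables.foldl (fun table_boxes table =>
    let cur := boxes.foldl (fun ib b => if pvInTable table b then ib ++ [b] else ib) []
    table_boxes ++ [PySem.List.sorted cur (fun b => b.2.1)]) []

-- ===== PORT B =====
def store_boxes_to_tables_alt (tables : List (Int × Int × Int × Int)) (boxes : List (Int × Int × Int × Int)) : List (List (Int × Int × Int × Int)) :=
  let boxes_by_y := PySem.List.sorted boxes (fun b => b.2.1)
  tables.map (fun t => boxes_by_y.filter (fun b => pvInTable t b))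

-- ===== PRECONDITION & SPEC =====
def Spec_store_boxes_to_tables (tables : List (Int × Int × Int × Int)) (boxes : List (Int × Int × Int × Int)) (out : List (List (Int × Int × Int × Int))) : Prop := out = store_boxes_to_tables_alt tables boxes
instance (tables : List (Int × Int × Int × Int)) (boxes : List (Int × Int × Int × Int)) (out : List (List (Int × Int × Int × Int))) : Decidable (Spec_store_boxes_to_tables tables boxes out) := by unfold Spec_store_boxes_to_tables; infer_instance

-- ===== CLAIM (what is proved, stated in full; the proofs are below) =====
def Claim_equal_store_boxes_to_tables : Prop := ∀ (tables : List (Int × Int × Int × Int)) (boxes : List (Int × Int × Int × Int)), Dom_store_boxes_to_tables tables boxes → Spec_store_boxes_to_tables tables boxes (store_boxes_to_tables tables boxes)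

-- ===== LEMMAS AND PROOFS =====

-- Inserting an element that sorts strictly before every element of the list puts it in front.
theorem insertBy_of_forall_lt {α : Type} (key : α → Int) (x : α) (l : List α)
    (h : ∀ z ∈ l, key x < key z) :
    PySem.List.insertBy (fun a b => decide (key a < key b)) x l = x :: l := by
  cases l with
  | nil => rfl
  | cons y ys =>
    simp [PySem.List.insertBy, h y (by simp)]

-- filter commutes with insertBy on a key-sorted list (stability core).
theorem filter_insertBy {α : Type} (key : α → Int) (p : α → Bool) (x : α) (ys : List α)
    (hs : ys.Pairwise (fun a b => key a ≤ key b)) :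
    (PySem.List.insertBy (fun a b => decide (key a < key b)) x ys).filter p =
      if p x then PySem.List.insertBy (fun a b => decide (key a < key b)) x (ys.filter p)
      else ys.filter p := by
  induction ys with
  | nil => simp [PySem.List.insertBy]; split <;> simp [List.filter, *]
  | cons y ys ih =>
    rw [List.pairwise_cons] at hs
    by_cases hxy : key x < key y
    · have hall : ∀ z ∈ (y :: ys).filter p, key x < key z := by
        intro z hz
        have hz' := List.mem_of_mem_filter hz
        rcases List.mem_cons.1 hz' with h1 | h1
        · subst h1; exact hxy
        · exact lt_of_lt_of_le hxy (hs.1 z h1)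
      rw [show PySem.List.insertBy (fun a b => decide (key a < key b)) x (y :: ys) = x :: y :: ys by
        simp [PySem.List.insertBy, hxy]]
      rw [insertBy_of_forall_lt key x _ hall]
      by_cases hpx : p x <;> simp [List.filter, hpx]
    · rw [show PySem.List.insertBy (fun a b => decide (key a < key b)) x (y :: ys)
          = y :: PySem.List.insertBy (fun a b => decide (key a < key b)) x ys by
        simp [PySem.List.insertBy, hxy]]
      have ih' := ih hs.2
      by_cases hpy : p y
      · simp only [List.filter, hpy, ih']
        by_cases hpx : p x
        · simp only [hpx, if_pos]
          rw [show PySem.List.insertBy (fun a b => decide (key a < key b)) x (y :: ys.filter p)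
              = y :: PySem.List.insertBy (fun a b => decide (key a < key b)) x (ys.filter p) by
            simp [PySem.List.insertBy, hxy]]
        · simp [hpx]
      · simp [List.filter, hpy, ih']

-- filter commutes with the stable sort (same key).
theorem filter_sorted {α : Type} (key : α → Int) (p : α → Bool) (xs : List α) :
    (PySem.List.sorted xs key).filter p = PySem.List.sorted (xs.filter p) key := by
  induction xs using List.reverseRecOn with
  | nil => rfl
  | append_singleton xs x ih =>
    rw [PySem.List.sorted_eq_foldl_insertBy, List.foldl_append, ← PySem.List.sorted_eq_foldl_insertBy]
    simp only [List.foldl_cons, List.foldl_nil]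
    rw [filter_insertBy key p x _ (PySem.List.sorted_pairwise xs key)]
    rw [List.filter_append]
    by_cases hpx : p x
    · simp only [hpx, if_pos, List.filter_cons_of_pos hpx, List.filter_nil]
      rw [PySem.List.sorted_eq_foldl_insertBy (xs.filter p ++ [x]), List.foldl_append,
        ← PySem.List.sorted_eq_foldl_insertBy]
      simp [ih]
    · simp [hpx, List.filter_cons_of_neg, ih]

-- ===== VERDICT (by name: the statement is the Claim_ definition above) =====
theorem store_boxes_to_tables_spec : Claim_equal_store_boxes_to_tables := by
  intro tables boxes _
  unfold Spec_store_boxes_to_tables store_boxes_to_tables store_boxes_to_tables_alt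
  rw [show (fun (table_boxes : List (List (Int × Int × Int × Int))) table =>
        table_boxes ++ [PySem.List.sorted (boxes.foldl (fun ib b => if pvInTable table b then ib ++ [b] else ib) []) (fun b => b.2.1)])
      = fun table_boxes table => table_boxes ++
          [(PySem.List.sorted boxes (fun b => b.2.1)).filter (fun b => pvInTable table b)] from ?_]
  · exact PySem.List.foldl_append_singleton_eq_map _ tables []
  · funext acc t
    have := PySem.List.foldl_append_if (fun b => pvInTable t b) id boxes []
    simp only [id, List.map_id, List.nil_append] at this
    rw [this]
    rw [filter_sorted]
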